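-- pv_equiv track=rewrite | github.com/cnino98/lca-stack | src/lca_stack/ipc/protocol.py | _select_schema_version
-- ===== SOURCE A (Python) =====
-- from typing import Iterable
--
-- SCHEMA_VERSION: int = 1
--
-- def _select_schema_version(advertised: Iterable[int]) -> int:
--     supported = [int(v) for v in advertised]
--     candidates = [v for v in supported if v <= int(SCHEMA_VERSION)]
--     if not candidates:
--         raise ValueError(
--             f"no compatible schema_version (daemon supports {sorted(set(supported))}, "
--             f"client supports <= {int(SCHEMA_VERSION)})"
--         )
--     return int(max(candidates))
-- ===== SOURCE B (Python) =====
-- from typing import Iterable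
--
-- SCHEMA_VERSION: int = 1
--
-- def _select_schema_version(advertised: Iterable[int]) -> int:
--     limit = int(SCHEMA_VERSION)
--     supported = [int(v) for v in advertised]
--     # sort descending, then take the first value not above the limit
--     for v in sorted(supported, reverse=True):
--         if v <= limit:
--             return int(v)
--     raise ValueError(
--         f"no compatible schema_version (daemon supports {sorted(set(supported))}, "
--         f"client supports <= {limit})"
--     )
-- ===== Notes on version B (the rewrite author's own statement) =====
-- stated objective: alternative
-- what changed: B sorts the advertised versions in descending order and returns the first one <= SCHEMA_VERSION (early-exit scan over a sorted list), instead of A's filter-comprehension followed by max(); Pre_ excludes inputs with no value <= SCHEMA_VERSION, on which both A and B raise the same ValueError.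
import Mathlib
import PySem

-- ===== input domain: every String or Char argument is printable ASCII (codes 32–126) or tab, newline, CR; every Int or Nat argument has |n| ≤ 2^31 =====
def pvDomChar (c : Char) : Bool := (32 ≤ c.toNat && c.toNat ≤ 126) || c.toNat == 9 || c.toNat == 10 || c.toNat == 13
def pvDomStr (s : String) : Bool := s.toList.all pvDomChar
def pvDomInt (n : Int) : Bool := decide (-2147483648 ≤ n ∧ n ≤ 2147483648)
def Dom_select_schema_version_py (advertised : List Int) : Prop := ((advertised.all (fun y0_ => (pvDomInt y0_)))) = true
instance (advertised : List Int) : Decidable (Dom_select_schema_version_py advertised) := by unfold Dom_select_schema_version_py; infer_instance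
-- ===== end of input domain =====

-- B sorts descending and returns the first value <= SCHEMA_VERSION (alternative algorithm: sort-then-scan
-- instead of filter+max); Pre_ excludes inputs where both raise the same ValueError.

-- ===== PORT A =====
def select_schema_version_py (advertised : List Int) : Int :=
  let supported := advertised.map (fun v => v)           -- [int(v) for v in advertised]; int() is identity on Int
  let candidates := supported.filter (fun v => v ≤ 1)    -- SCHEMA_VERSION = 1
  match PySem.List.max? candidates (fun x => x) with
  | some m => m
  | none => 0                                            -- ValueError: excluded by Pre_

-- ===== PORT B =====
def select_schema_version_py_alt (advertised : List Int) : Int :=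
  let supported := advertised.map (fun v => v)           -- [int(v) for v in advertised]
  match (PySem.List.sorted supported (fun x => x) true).find? (fun v => decide (v ≤ 1)) with
  | some v => v                                          -- early return inside the for loop
  | none => 0                                            -- ValueError: excluded by Pre_

-- ===== PRECONDITION & SPEC =====
-- Pre_ excludes exactly the inputs with no value ≤ SCHEMA_VERSION, on which the Python A raises ValueError.
def Pre_select_schema_version_py (advertised : List Int) : Prop :=
  advertised.any (fun v => decide (v ≤ 1)) = true
instance (advertised : List Int) : Decidable (Pre_select_schema_version_py advertised) := by
  unfold Pre_select_schema_version_py; infer_instance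
def pvWitness_select_schema_version_py : List Int := [2, 1, 0]

def Spec_select_schema_version_py (advertised : List Int) (out : Int) : Prop := out = select_schema_version_py_alt advertised
instance (advertised : List Int) (out : Int) : Decidable (Spec_select_schema_version_py advertised out) := by unfold Spec_select_schema_version_py; infer_instance

-- ===== CLAIM (what is proved, stated in full; the proofs are below) =====
def Claim_equal_select_schema_version_py : Prop := ∀ (advertised : List Int), Dom_select_schema_version_py advertised → Pre_select_schema_version_py advertised → Spec_select_schema_version_py advertised (select_schema_version_py advertised)

-- ===== LEMMAS AND PROOFS =====

-- ===== VERDICT (by name: the statement is the Claim_ definition above) =====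
theorem select_schema_version_py_spec : Claim_equal_select_schema_version_py := by
  intro advertised _ hpre
  unfold Pre_select_schema_version_py at hpre
  simp only [List.any_eq_true, decide_eq_true_eq] at hpre
  obtain ⟨w, hwmem, hwle⟩ := hpre
  unfold Spec_select_schema_version_py select_schema_version_py select_schema_version_py_alt
  simp only [List.map_id']
  set s := PySem.List.sorted advertised (fun x => x) true with hs
  -- both matches are `some`
  have hmaxne : PySem.List.max? (advertised.filter (fun v => v ≤ 1)) (fun x => x) ≠ none := by
    rw [Ne, PySem.List.max?_eq_none_iff, List.filter_eq_nil_iff]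
    intro h
    exact absurd hwle (by simpa using h w hwmem)
  obtain ⟨m, hm⟩ := Option.ne_none_iff_exists'.mp hmaxne
  have hmmem : m ∈ advertised.filter (fun v => v ≤ 1) := PySem.List.max?_mem hm
  have hmmax : ∀ y ∈ advertised.filter (fun v => v ≤ 1), y ≤ m := by
    intro y hy; exact PySem.List.max?_isMax hm y hy
  have hfindne : s.find? (fun v => decide (v ≤ 1)) ≠ none := by
    rw [Ne, List.find?_eq_none]
    push Not
    exact ⟨w, (PySem.List.mem_sorted _ _ _ _).mpr hwmem, by simpa using hwle⟩
  obtain ⟨h, hh⟩ := Option.ne_none_iff_exists'.mp hfindne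
  obtain ⟨hph, as, bs, hsplit, hfail⟩ := List.find?_eq_some_iff_append.mp hh
  have hhle : h ≤ 1 := by simpa using hph
  have hperm : s.Perm advertised := PySem.List.sorted_perm _ _ _
  have hpw : s.Pairwise (fun a b => b ≤ a) := by
    simpa [hs] using PySem.List.sorted_pairwise_rev advertised (fun x : Int => x)
  -- h ≤ m : h is in advertised and ≤ 1
  have hhmem : h ∈ advertised := hperm.mem_iff.mp (by rw [hsplit]; simp)
  have h_le_m : h ≤ m := hmmax h (List.mem_filter.mpr ⟨hhmem, by simpa using hhle⟩)
  -- m ≤ h : m is in s; it cannot be in as (those fail v ≤ 1); in h :: bs it is ≤ h by pairwise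
  have hmle : m ≤ 1 := by simpa using (List.mem_filter.mp hmmem).2
  have hms : m ∈ s := hperm.mem_iff.mpr (List.mem_filter.mp hmmem).1
  have m_le_h : m ≤ h := by
    rw [hsplit] at hms hpw
    rcases List.mem_append.mp hms with hin | hin
    · exact absurd hmle (by simpa using hfail m hin)
    · rcases List.mem_cons.mp hin with rfl | hin
      · exact le_refl _
      · exact (List.pairwise_cons.mp (List.pairwise_append.mp hpw).2.1).1 m hin
  rw [hm, hh]
  exact le_antisymm m_le_h h_le_m
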